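-- pv_equiv track=rewrite | github.com/SugeilyCruz/Compiladores- | compilador.py | tokeniza
-- ===== SOURCE A (Python) =====
-- def esSeparador(caracter):
--     return caracter in " \n\t"
--
-- def esSimboloEsp(caracter):
--     return caracter in "+-*;,.:!=%&/()[]{}<><=>=:="
--
-- def tokeniza(cad):
--     tokens = []
--     dentro = False
--     token = ""
--     for c in cad:
--         if dentro: #esta dentro del token
--             if esSeparador(c):
--                 tokens.append(token)
--                 token = ""
--                 dentro = False
--             elif esSimboloEsp(c):
--                 tokens.append(token)
--                 tokens.append(c)
--                 token = ""
--                 dentro = False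
--             else:
--                 token = token + c
--         else: #esta fuera del token
--             if esSimboloEsp(c):
--                 tokens.append(c)
--             elif esSeparador(c):
--                 a=0
--             else:
--                 dentro = True
--                 token = c
--     if token != '':
--        tokens.append(token)
--     return tokens
--
-- c=0
-- ===== SOURCE B (Python) =====
-- def tokeniza(cad):
--     separadores = " \n\t"
--     especiales = "+-*;,.:!=%&/()[]{}<>"
--     tokens = []
--     i, n = 0, len(cad)
--     while i < n:
--         c = cad[i]
--         if c in separadores:
--             i += 1
--         elif c in especiales:
--             tokens.append(c)
--             i += 1
--         else:
--             j = i + 1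
--             while j < n and cad[j] not in separadores and cad[j] not in especiales:
--                 j += 1
--             tokens.append(cad[i:j])
--             i = j
--     return tokens
-- ===== Notes on version B (the rewrite author's own statement) =====
-- stated objective: alternative
-- what changed: Replaced A's character-by-character state machine (dentro flag plus a token string grown by repeated concatenation) with a two-pointer scan that skips separators, emits specials directly, and slices each maximal run of ordinary characters out in one step.
import Mathlib
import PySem

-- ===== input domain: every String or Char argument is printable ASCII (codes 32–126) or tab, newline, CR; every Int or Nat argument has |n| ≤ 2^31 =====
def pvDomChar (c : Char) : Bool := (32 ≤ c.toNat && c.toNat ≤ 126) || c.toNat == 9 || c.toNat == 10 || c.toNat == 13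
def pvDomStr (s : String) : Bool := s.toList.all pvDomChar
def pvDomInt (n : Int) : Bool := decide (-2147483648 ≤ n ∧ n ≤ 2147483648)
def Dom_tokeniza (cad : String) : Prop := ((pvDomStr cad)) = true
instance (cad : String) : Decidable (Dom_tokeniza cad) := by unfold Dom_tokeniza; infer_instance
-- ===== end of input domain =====

-- B replaces A's char-by-char state machine (dentro flag + growing token string) by a
-- two-pointer scan that emits each maximal run of ordinary characters in one step (objective: alternative).

-- ===== PORT A =====
def esSeparador (c : Char) : Bool := (" \n\t".toList).contains c

def esSimboloEsp (c : Char) : Bool := ("+-*;,.:!=%&/()[]{}<><=>=:=".toList).contains c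

-- A's loop state: accumulated tokens, the 'dentro' flag, the current token (as chars, built left-to-right)
def tokenizaGo : List String → Bool → List Char → List Char → List String
  | tokens, _, token, [] => if token ≠ [] then tokens ++ [String.ofList token] else tokens
  | tokens, dentro, token, c :: cs =>
    if dentro then
      if esSeparador c then tokenizaGo (tokens ++ [String.ofList token]) false [] cs
      else if esSimboloEsp c then
        tokenizaGo (tokens ++ [String.ofList token, String.ofList [c]]) false [] cs
      else tokenizaGo tokens true (token ++ [c]) cs
    else
      if esSimboloEsp c then tokenizaGo (tokens ++ [String.ofList [c]]) dentro token cs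
      else if esSeparador c then tokenizaGo tokens dentro token cs
      else tokenizaGo tokens true [c] cs

def tokeniza (cad : String) : List String := tokenizaGo [] false [] cad.toList

-- ===== PORT B =====
-- a character that belongs to a token run (neither separator nor special)
def esOrdinario (c : Char) : Bool := !(c == ' ' || c == '\n' || c == '\t') && !(("+-*;,.:!=%&/()[]{}<>".toList).contains c)

def tokenizaAltGo : List Char → List String
  | [] => []
  | c :: cs =>
    if (c == ' ' || c == '\n' || c == '\t') then tokenizaAltGo cs
    else if ("+-*;,.:!=%&/()[]{}<>".toList).contains c then
      String.ofList [c] :: tokenizaAltGo cs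
    else
      String.ofList (c :: cs.takeWhile esOrdinario) :: tokenizaAltGo (cs.dropWhile esOrdinario)
  termination_by l => l.length
  decreasing_by
    · simp
    · simp
    · exact Nat.lt_succ_of_le (List.length_dropWhile_le _ _)

def tokeniza_alt (cad : String) : List String := tokenizaAltGo cad.toList

-- ===== PRECONDITION & SPEC =====
def Spec_tokeniza (cad : String) (out : List String) : Prop := out = tokeniza_alt cad
instance (cad : String) (out : List String) : Decidable (Spec_tokeniza cad out) := by unfold Spec_tokeniza; infer_instance

-- ===== CLAIM (what is proved, stated in full; the proofs are below) =====
def Claim_equal_tokeniza : Prop := ∀ (cad : String), Dom_tokeniza cad → Spec_tokeniza cad (tokeniza cad)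

-- ===== LEMMAS AND PROOFS =====

theorem sep_not_ord {c : Char} (h : esSeparador c = true) : esOrdinario c = false := by
  simp [esSeparador] at h
  simp [esOrdinario]
  tauto

theorem esp_not_ord {c : Char} (h : esSimboloEsp c = true) : esOrdinario c = false := by
  simp [esSimboloEsp] at h
  simp [esOrdinario]
  tauto

theorem esp_not_sep {c : Char} (h : esSimboloEsp c = true) : esSeparador c = false := by
  simp [esSimboloEsp] at h
  rcases h with h|h|h|h|h|h|h|h|h|h|h|h|h|h|h|h|h|h|h|h|h|h|h|h|h|h <;> subst h <;> decide

theorem ord_of_not {c : Char} (hs : esSeparador c = false) (he : esSimboloEsp c = false) :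
    esOrdinario c = true := by
  simp [esSeparador] at hs
  simp [esSimboloEsp] at he
  simp [esOrdinario]
  tauto

theorem sep_iff (c : Char) : esSeparador c = (c == ' ' || c == '\n' || c == '\t') := by
  rw [Bool.eq_iff_iff]
  simp [esSeparador]
  tauto

theorem esp_iff (c : Char) :
    esSimboloEsp c = (("+-*;,.:!=%&/()[]{}<>".toList).contains c) := by
  rw [Bool.eq_iff_iff]
  simp [esSimboloEsp]
  tauto

-- Combined invariant: outside a token A's loop equals B's scan; inside a token
-- (current partial token tok, nonempty) A keeps consuming the ordinary run that B
-- takes in one step.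
theorem go_both (l : List Char) :
    (∀ (tokens : List String), tokenizaGo tokens false [] l = tokens ++ tokenizaAltGo l)
    ∧ (∀ (tokens : List String) (tok : List Char), tok ≠ [] →
        tokenizaGo tokens true tok l =
          tokens ++ (String.ofList (tok ++ l.takeWhile esOrdinario)
            :: tokenizaAltGo (l.dropWhile esOrdinario))) := by
  induction l with
  | nil =>
    constructor
    · intro tokens; simp [tokenizaGo, tokenizaAltGo]
    · intro tokens tok htok; simp [tokenizaGo, tokenizaAltGo, htok]
  | cons c cs ih =>
    obtain ⟨ihOut, ihIn⟩ := ih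
    by_cases he : esSimboloEsp c = true
    · -- special symbol (never a separator)
      have hsF : esSeparador c = false := esp_not_sep he
      have ho : esOrdinario c = false := esp_not_ord he
      have hs' : (c == ' ' || c == '\n' || c == '\t') = false := (sep_iff c) ▸ hsF
      have he' : (("+-*;,.:!=%&/()[]{}<>".toList).contains c) = true := (esp_iff c) ▸ he
      constructor
      · intro tokens
        simp only [tokenizaGo]
        rw [if_neg (by simp), if_pos he, ihOut]
        conv_rhs => rw [tokenizaAltGo]
        rw [if_neg (by simpa using hs'), if_pos he']
        simp
      · intro tokens tok htok
        simp only [tokenizaGo]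
        rw [if_pos trivial, if_neg (by simp [hsF]), if_pos he, ihOut]
        simp only [List.takeWhile_cons, List.dropWhile_cons, ho, Bool.false_eq_true,
          if_false]
        conv_rhs => rw [tokenizaAltGo]
        rw [if_neg (by simpa using hs'), if_pos he']
        simp
    · have heF : esSimboloEsp c = false := eq_false_of_ne_true he
      have he' : (("+-*;,.:!=%&/()[]{}<>".toList).contains c) = false := (esp_iff c) ▸ heF
      by_cases hs : esSeparador c = true
      · -- separator
        have ho : esOrdinario c = false := sep_not_ord hs
        have hs' : (c == ' ' || c == '\n' || c == '\t') = true := (sep_iff c) ▸ hs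
        constructor
        · intro tokens
          simp only [tokenizaGo]
          rw [if_neg (by simp), if_neg (by simp [heF]), if_pos hs, ihOut]
          conv_rhs => rw [tokenizaAltGo]
          rw [if_pos hs']
        · intro tokens tok htok
          simp only [tokenizaGo]
          rw [if_pos trivial, if_pos hs, ihOut]
          simp only [List.takeWhile_cons, List.dropWhile_cons, ho, Bool.false_eq_true,
            if_false]
          conv_rhs => rw [tokenizaAltGo]
          rw [if_pos hs']
          simp
      · -- ordinary character
        have hsF : esSeparador c = false := eq_false_of_ne_true hs
        have ho : esOrdinario c = true := ord_of_not hsF heF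
        have hs' : (c == ' ' || c == '\n' || c == '\t') = false := (sep_iff c) ▸ hsF
        constructor
        · intro tokens
          simp only [tokenizaGo]
          rw [if_neg (by simp), if_neg (by simp [heF]), if_neg (by simp [hsF]),
            ihIn tokens [c] (by simp)]
          conv_rhs => rw [tokenizaAltGo]
          rw [if_neg (by simpa using hs'), if_neg (by simpa using he')]
          simp
        · intro tokens tok htok
          simp only [tokenizaGo]
          rw [if_pos trivial, if_neg (by simp [hsF]), if_neg (by simp [heF]),
            ihIn tokens (tok ++ [c]) (by simp)]
          simp only [List.takeWhile_cons, List.dropWhile_cons, ho, if_true]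
          simp

-- ===== VERDICT (by name: the statement is the Claim_ definition above) =====
theorem tokeniza_spec : Claim_equal_tokeniza := by
  intro cad _
  unfold Spec_tokeniza tokeniza tokeniza_alt
  simpa using (go_both cad.toList).1 []
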